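-- pv_equiv track=rewrite | github.com/BAD4R/VideoCreation | SCRIPTS/DavinciScripts/VideoCombiners/clipsAndImages_script.py | _last_whitespace_before
-- ===== SOURCE A (Python) =====
-- def _last_whitespace_before(text: str, idx: int) -> int:
--     if not text:
--         return -1
--     i = min(idx, len(text) - 1)
--     while i >= 0:
--         if text[i].isspace():
--             return i
--         i -= 1
--     return -1
-- ===== SOURCE B (Python) =====
-- def _last_whitespace_before(text: str, idx: int) -> int:
--     if not text:
--         return -1
--     b = min(idx, len(text) - 1)
--     last = -1
--     for i in range(b + 1):
--         if text[i].isspace():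
--             last = i
--     return last
-- ===== Notes on version B (the rewrite author's own statement) =====
-- stated objective: alternative
-- what changed: A scans backward from the bound and early-returns at the first whitespace; B scans the prefix forward once, keeping the last whitespace index in an accumulator and returning it at the end.
import Mathlib
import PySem

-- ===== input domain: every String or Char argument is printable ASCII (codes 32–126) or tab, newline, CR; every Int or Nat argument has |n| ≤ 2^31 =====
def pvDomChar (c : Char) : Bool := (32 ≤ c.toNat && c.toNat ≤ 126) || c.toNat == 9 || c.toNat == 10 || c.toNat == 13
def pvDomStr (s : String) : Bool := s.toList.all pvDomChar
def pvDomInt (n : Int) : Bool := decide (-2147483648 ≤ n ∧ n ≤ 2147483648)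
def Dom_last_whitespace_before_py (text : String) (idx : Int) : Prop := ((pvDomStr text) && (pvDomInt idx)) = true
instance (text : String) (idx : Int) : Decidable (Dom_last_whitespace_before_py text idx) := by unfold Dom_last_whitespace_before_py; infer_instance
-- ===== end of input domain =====

-- B replaces A's backward early-return scan by a single forward scan of the prefix
-- that keeps the last whitespace index in an accumulator (alternative decomposition, same cost).

-- ===== PORT A =====
-- the backward 'while i >= 0' loop of A; the 'none' branch is unreachable when the
-- start index is < length (A guarantees i = min(idx, len-1))
def pvLoopA (cs : List Char) (i : Int) : Int :=
  if h : 0 ≤ i then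
    match PySem.List.pyGet? cs i with
    | some c => if PySem.Chars.isspace c then i else pvLoopA cs (i - 1)
    | none => -1
  else -1
termination_by (i + 1).toNat
decreasing_by omega

def last_whitespace_before_py (text : String) (idx : Int) : Int :=
  let cs := text.toList
  if cs = [] then -1
  else pvLoopA cs (min idx ((cs.length : Int) - 1))

-- ===== PORT B =====
def last_whitespace_before_py_alt (text : String) (idx : Int) : Int :=
  let cs := text.toList
  if cs = [] then -1
  else
    (PySem.List.pyRange 0 (min idx ((cs.length : Int) - 1) + 1) 1).foldl
      (fun last i => if PySem.Chars.isspace (PySem.List.pyGetD cs i ' ') then i else last) (-1)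

-- ===== PRECONDITION & SPEC =====
def Spec_last_whitespace_before_py (text : String) (idx : Int) (out : Int) : Prop := out = last_whitespace_before_py_alt text idx
instance (text : String) (idx : Int) (out : Int) : Decidable (Spec_last_whitespace_before_py text idx out) := by unfold Spec_last_whitespace_before_py; infer_instance

-- ===== CLAIM (what is proved, stated in full; the proofs are below) =====
def Claim_equal_last_whitespace_before_py : Prop := ∀ (text : String) (idx : Int), Dom_last_whitespace_before_py text idx → Spec_last_whitespace_before_py text idx (last_whitespace_before_py text idx)

-- ===== LEMMAS AND PROOFS =====

-- the backward first-match loop equals the forward last-match fold on [0..n]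
theorem pvLoopA_eq_fold (cs : List Char) (n : Nat) (hn : n < cs.length) :
    pvLoopA cs (n : Int) =
      (PySem.List.pyRange 0 ((n : Int) + 1) 1).foldl
        (fun last i => if PySem.Chars.isspace (PySem.List.pyGetD cs i ' ') then i else last) (-1) := by
  induction n with
  | zero =>
      simp only [Nat.cast_zero]
      rw [pvLoopA, dif_pos (le_refl 0), PySem.List.pyRange_one_singleton,
          PySem.List.pyGet?_zero, List.getElem?_eq_getElem hn,
          show pvLoopA cs (0 - 1) = -1 from by rw [pvLoopA, dif_neg (by norm_num)]]
      simp [PySem.List.pyGetD_zero, List.getElem?_eq_getElem hn]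
  | succ m ih =>
      have hm : m < cs.length := Nat.lt_of_succ_lt hn
      have hsplit : PySem.List.pyRange 0 (((m + 1 : Nat) : Int) + 1) 1 =
          PySem.List.pyRange 0 (((m : Nat) : Int) + 1) 1 ++ [((m + 1 : Nat) : Int)] := by
        have := PySem.List.pyRange_one_succ_right (show (0:Int) ≤ ((m : Nat) : Int) + 1 by omega)
        push_cast at this ⊢
        convert this using 2
      rw [hsplit, List.foldl_append]
      simp only [List.foldl_cons, List.foldl_nil]
      rw [pvLoopA, dif_pos (by omega)]
      rw [show PySem.List.pyGet? cs ((m + 1 : Nat) : Int) = some cs[m + 1] by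
            rw [PySem.List.pyGet?_natCast, List.getElem?_eq_getElem hn]]
      simp only [PySem.List.pyGetD_natCast, List.getD_eq_getElem _ _ hn]
      by_cases hsp : PySem.Chars.isspace cs[m + 1] = true
      · simp [hsp]
      · simp only [hsp, if_false, Bool.false_eq_true]
        have hstep : ((m + 1 : Nat) : Int) - 1 = ((m : Nat) : Int) := by push_cast; ring
        rw [hstep]
        exact ih hm

-- ===== VERDICT (by name: the statement is the Claim_ definition above) =====
theorem last_whitespace_before_py_spec : Claim_equal_last_whitespace_before_py := by
  intro text idx _
  unfold Spec_last_whitespace_before_py last_whitespace_before_py last_whitespace_before_py_alt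
  by_cases hnil : text.toList = []
  · simp [hnil]
  · simp only [hnil, if_false]
    set cs := text.toList with hcs
    set b : Int := min idx ((cs.length : Int) - 1) with hb
    by_cases hneg : b < 0
    · rw [pvLoopA, dif_neg (by omega), PySem.List.pyRange_one_eq_nil (by omega)]
      simp
    · push_neg at hneg
      have hlen : 0 < cs.length := List.length_pos_iff.mpr hnil
      have hblt : b < (cs.length : Int) := by omega
      have hbn : b = ((b.toNat : Nat) : Int) := by omega
      have hltn : b.toNat < cs.length := by omega
      rw [hbn]
      exact pvLoopA_eq_fold cs b.toNat hltn
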